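-- pv_equiv track=rewrite | github.com/madr/advent_of_code_2016 | madr-python3/day_12.py | solve
-- ===== SOURCE A (Python) =====
-- def solve(pinput, registers):
--     lines = pinput.splitlines()
--     n = 0
--
--     while n < len(lines):
--         l = lines[n]
--         if l.startswith('cpy'):
--             c, v, r = l.split()
--             registers[r] = registers[v] if v in registers.keys() else int(v)
--
--         if l.startswith('inc') or l.startswith('dec'):
--             c, r = l.split()
--             registers[r] += 1 if c == 'inc' else -1
--
--         if l.startswith('jnz'):
--             c, nz, v = l.split()
--             nz = int(registers[nz]) if nz in registers.keys() else int(nz)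
--             n = n + int(v) if nz != 0 else n + 1
--         else:
--             n += 1
--
--     return registers
-- ===== SOURCE B (Python) =====
-- # B: compile the program once into (opcode, args) tuples and run a peephole
-- # optimization: a 'dec r' immediately followed by 'jnz r -1' is a pure
-- # countdown loop, replaced by a 'countdown' instruction executed in O(1).
-- # Mutates `registers` in place and returns it, like A.
-- def solve(pinput, registers):
--     def parse(line):
--         if line.startswith('cpy'):
--             _, src, dst = line.split()
--             return ('cpy', src, dst)
--         if line.startswith('inc') or line.startswith('dec'):
--             c, reg = line.split()
--             return ('add', reg, 1 if c == 'inc' else -1)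
--         if line.startswith('jnz'):
--             _, cond, off = line.split()
--             return ('jnz', cond, int(off))
--         return ('nop',)
--
--     prog = [parse(l) for l in pinput.splitlines()]
--     prog = [('countdown', ins[1])
--             if ins[0] == 'jnz' and ins[2] == -1 and i >= 1
--                and prog[i - 1] == ('add', ins[1], -1)
--             else ins
--             for i, ins in enumerate(prog)]
--
--     def value(tok):
--         return registers[tok] if tok in registers else int(tok)
--
--     pc = 0
--     while 0 <= pc < len(prog):
--         ins = prog[pc]
--         op = ins[0]
--         if op == 'cpy':
--             registers[ins[2]] = value(ins[1])
--             pc += 1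
--         elif op == 'add':
--             registers[ins[1]] += ins[2]
--             pc += 1
--         elif op == 'jnz':
--             pc = pc + ins[2] if value(ins[1]) != 0 else pc + 1
--         elif op == 'countdown':
--             v = value(ins[1])
--             if v > 0:
--                 registers[ins[1]] = 0
--                 pc += 1
--             else:
--                 pc = pc - 1 if v != 0 else pc + 1
--         else:
--             pc += 1
--     return registers
-- ===== Notes on version B (the rewrite author's own statement) =====
-- stated objective: alternative
-- what changed: B compiles the program once into (opcode, args) tuples and runs a peephole optimization: a 'dec r' immediately followed by 'jnz r -1' is recognized at compile time as a pure countdown loop and replaced by a 'countdown' instruction that zeroes the register in O(1) instead of iterating it to 0 one step at a time.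
-- outside the precondition, e.g. on solve('jnz 1 2\ncpy', {}): A returns {}, B raises ValueError; on solve('cpy 1 z\ninc z', {}): A returns {'z': 2}, B returns {'z': 2}; on solve('jnz a -1\njnz 1 3\ndec a', {'a': 1}): A returns {'a': 0}, B returns {'a': 1}
import Mathlib
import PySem

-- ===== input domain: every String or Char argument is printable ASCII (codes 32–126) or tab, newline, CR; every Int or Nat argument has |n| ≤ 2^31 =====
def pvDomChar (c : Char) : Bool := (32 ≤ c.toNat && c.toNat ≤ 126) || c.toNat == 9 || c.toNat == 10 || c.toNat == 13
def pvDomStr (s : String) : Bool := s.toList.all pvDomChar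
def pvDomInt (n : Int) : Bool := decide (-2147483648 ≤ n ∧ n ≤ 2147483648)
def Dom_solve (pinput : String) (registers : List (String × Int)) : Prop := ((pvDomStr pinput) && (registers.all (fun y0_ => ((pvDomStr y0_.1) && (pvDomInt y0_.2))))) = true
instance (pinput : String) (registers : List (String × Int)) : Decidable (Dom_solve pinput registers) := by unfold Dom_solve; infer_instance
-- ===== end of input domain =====

-- B compiles the program once into instruction tuples and peephole-replaces every
-- 'dec r; jnz r -1' countdown loop by a constant-time 'countdown' instruction, where A
-- re-splits the raw strings and steps every loop iteration (objective: alternative).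
-- Both Pythons mutate `registers` in place and return it; the equivalence proved here is
-- about the returned mapping.  The fuel argument of both loop ports is only a totality
-- guard (the source language can loop forever); both ports count the same small steps,
-- so the equivalence holds for every fuel value.

-- ===== PORT A =====
-- literal transliteration of A's while-loop (fuel = totality guard, one unit per iteration)
def solveLoopA (lines : List String) : Nat → Int → PySem.Dict String Int → PySem.Dict String Int
  | 0, _, regs => regs
  | fuel + 1, n, regs =>
    if n < (lines.length : Int) then
      let l := (PySem.List.pyGet? lines n).getD ""      -- l = lines[n]; in range under Pre_solve
      let regs1 :=
        if PySem.Str.startswith l "cpy" then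
          match PySem.Str.split₀ l with
          | [_c, v, r] =>
              PySem.Dict.insert regs r
                (if PySem.Dict.contains regs v then PySem.Dict.getD regs v 0
                 else (PySem.Int.ofStr? v).getD 0)       -- int(v); parses under Pre_solve
          | _ => regs                                    -- ValueError in Python; outside Pre_solve
        else regs
      let regs2 :=
        if PySem.Str.startswith l "inc" || PySem.Str.startswith l "dec" then
          match PySem.Str.split₀ l with
          | [c, r] =>
              match PySem.Dict.get? regs1 r with
              | some x => PySem.Dict.insert regs1 r (x + (if c = "inc" then 1 else -1))
              | none => regs1                            -- KeyError in Python; outside Pre_solve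
          | _ => regs1                                   -- ValueError in Python; outside Pre_solve
        else regs1
      if PySem.Str.startswith l "jnz" then
        match PySem.Str.split₀ l with
        | [_c, nz, v] =>
            let nzv := if PySem.Dict.contains regs2 nz then PySem.Dict.getD regs2 nz 0
                       else (PySem.Int.ofStr? nz).getD 0
            solveLoopA lines fuel (if nzv ≠ 0 then n + (PySem.Int.ofStr? v).getD 0 else n + 1) regs2
        | _ => solveLoopA lines fuel (n + 1) regs2       -- ValueError in Python; outside Pre_solve
      else solveLoopA lines fuel (n + 1) regs2
    else regs

def solve (pinput : String) (registers : List (String × Int)) : List (String × Int) :=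
  let lines := PySem.Str.splitlines pinput
  (solveLoopA lines (2 ^ 63) 0 (PySem.Dict.mk registers)).items

-- ===== PORT B =====
inductive PInstr : Type
  | cpy : String → String → PInstr
  | add : String → Int → PInstr
  | jnz : String → Int → PInstr
  | countdown : String → PInstr
  | nop : PInstr
deriving DecidableEq, Repr

-- Source B's parse(line)
def parseInstr (line : String) : PInstr :=
  if PySem.Str.startswith line "cpy" then
    match PySem.Str.split₀ line with
    | [_c, src, dst] => .cpy src dst
    | _ => .nop                                          -- ValueError in Python; outside Pre_solve
  else if PySem.Str.startswith line "inc" || PySem.Str.startswith line "dec" then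
    match PySem.Str.split₀ line with
    | [c, reg] => .add reg (if c = "inc" then 1 else -1)
    | _ => .nop                                          -- ValueError in Python; outside Pre_solve
  else if PySem.Str.startswith line "jnz" then
    match PySem.Str.split₀ line with
    | [_c, cond, off] => .jnz cond ((PySem.Int.ofStr? off).getD 0)  -- int(off); parses under Pre_solve
    | _ => .nop                                          -- ValueError in Python; outside Pre_solve
  else .nop

-- Source B's peephole pass: 'dec r' directly before 'jnz r -1' turns that jnz into a countdown
def compileProg (prog : List PInstr) : List PInstr :=
  (List.range prog.length).map (fun i =>
    (match prog[i]? with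
     | some (PInstr.jnz r k) =>
         if k = -1 ∧ 1 ≤ i ∧ prog[i - 1]? = some (.add r (-1)) then PInstr.countdown r
         else PInstr.jnz r k
     | some ins => ins
     | none => PInstr.nop : PInstr))

-- Source B's value(tok)
def valOf (regs : PySem.Dict String Int) (tok : String) : Int :=
  match PySem.Dict.get? regs tok with
  | some x => x
  | none => (PySem.Int.ofStr? tok).getD 0

-- Source B's while loop.  The fuel is the totality guard; it counts SIMULATED small steps
-- (a countdown over value v pays the 2*v+1 steps A would take), so both ports truncate
-- identically; the fuel-exhausted branches return the truncated small-step state.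
def execB (prog : List PInstr) : Nat → Int → PySem.Dict String Int → PySem.Dict String Int
  | 0, _, regs => regs
  | n + 1, pc, regs =>
    if 0 ≤ pc ∧ pc < (prog.length : Int) then
      match (PySem.List.pyGet? prog pc).getD .nop with   -- prog[pc]; in range by the guard
      | .cpy src dst => execB prog n (pc + 1) (PySem.Dict.insert regs dst (valOf regs src))
      | .add r d =>
        match PySem.Dict.get? regs r with
        | some x => execB prog n (pc + 1) (PySem.Dict.insert regs r (x + d))
        | none => execB prog n (pc + 1) regs             -- KeyError in Python; outside Pre_solve
      | .jnz c k => execB prog n (if valOf regs c ≠ 0 then pc + k else pc + 1) regs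
      | .countdown r =>
        let v := valOf regs r
        if 0 < v then
          if 2 * v ≤ (n : Int) then
            execB prog (n - 2 * v.toNat) (pc + 1) (PySem.Dict.insert regs r 0)
          else if n = 0 then regs                        -- fuel exhausted (never under a run Python finishes)
          else PySem.Dict.insert regs r (v - min v (((n + 1) / 2 : Nat) : Int))
        else execB prog n (pc + (if v ≠ 0 then -1 else 1)) regs
      | .nop => execB prog n (pc + 1) regs
    else regs
  termination_by fuel => fuel
  decreasing_by all_goals omega

def solve_alt (pinput : String) (registers : List (String × Int)) : List (String × Int) :=
  let prog := compileProg ((PySem.Str.splitlines pinput).map parseInstr)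
  (execB prog (2 ^ 63) 0 (PySem.Dict.mk registers)).items

-- ===== PRECONDITION & SPEC =====
def tokOK (keys : List String) (t : String) : Bool :=
  keys.contains t || (PySem.Int.ofStr? t).isSome

-- a statically well-formed assembunny line (at line index i) over the initial register names
def lineOK (keys : List String) (i : Nat) (l : String) : Bool :=
  (if PySem.Str.startswith l "cpy" then
     match PySem.Str.split₀ l with
     | [_c, v, _r] => tokOK keys v
     | _ => false
   else true) &&
  (if PySem.Str.startswith l "inc" || PySem.Str.startswith l "dec" then
     match PySem.Str.split₀ l with
     | [_c, r] => keys.contains r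
     | _ => false
   else true) &&
  (if PySem.Str.startswith l "jnz" then
     match PySem.Str.split₀ l with
     | [_c, nz, v] =>
         tokOK keys nz &&
         (match PySem.Int.ofStr? v with | some k => decide (0 ≤ (i : Int) + k) | none => false)
     | _ => false
   else true)

-- Pre_solve: every cpy/inc/dec/jnz line is statically well formed (right token count, int
-- literals parse, registers that are read or incremented are among the initial keys), and
-- no jnz jumps to before line 0.  This excludes (a) inputs where an executed malformed
-- line / missing register makes A raise ValueError/KeyError, (b) as a static
-- approximation, some inputs A returns on because the bad line is never executed or the
-- register was created by an earlier cpy (B parses all lines up front and raises on (a)'s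
-- shape; it returns A's value on the created-register case), and (c) jumps before line 0,
-- where A's negative-index wraparound re-enters the program from the end (usually
-- diverging or raising IndexError, occasionally returning) while B's 0 ≤ pc guard stops.
def Pre_solve (pinput : String) (registers : List (String × Int)) : Prop :=
  ∀ i, ∀ _ : i < (PySem.Str.splitlines pinput).length,
    lineOK (registers.map Prod.fst) i ((PySem.Str.splitlines pinput)[i]'‹_›) = true

instance (pinput : String) (registers : List (String × Int)) : Decidable (Pre_solve pinput registers) := by
  unfold Pre_solve; infer_instance

def pvWitness_solve : String × (List (String × Int)) :=
  ("cpy 5 a\ndec a\njnz a -1\ninc b\nhello world", [("a", 0), ("b", 7)])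

def Spec_solve (pinput : String) (registers : List (String × Int)) (out : List (String × Int)) : Prop := out = solve_alt pinput registers
instance (pinput : String) (registers : List (String × Int)) (out : List (String × Int)) : Decidable (Spec_solve pinput registers out) := by unfold Spec_solve; infer_instance

-- ===== CLAIM (what is proved, stated in full; the proofs are below) =====
def Claim_equal_solve : Prop := ∀ (pinput : String) (registers : List (String × Int)), Dom_solve pinput registers → Pre_solve pinput registers → Spec_solve pinput registers (solve pinput registers)

-- ===== LEMMAS AND PROOFS =====

-- A-like small-step interpreter over the parsed program: the middle man between the two
-- ports (equal to A's loop by `loopA_eq_step`, to B's loop by `step_eq_exec`).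
def stepExec (prog : List PInstr) : Nat → Int → PySem.Dict String Int → PySem.Dict String Int
  | 0, _, regs => regs
  | fuel + 1, pc, regs =>
    if 0 ≤ pc ∧ pc < (prog.length : Int) then
      match (PySem.List.pyGet? prog pc).getD .nop with
      | .cpy src dst => stepExec prog fuel (pc + 1) (PySem.Dict.insert regs dst (valOf regs src))
      | .add r d =>
        match PySem.Dict.get? regs r with
        | some x => stepExec prog fuel (pc + 1) (PySem.Dict.insert regs r (x + d))
        | none => stepExec prog fuel (pc + 1) regs
      | .jnz c k => stepExec prog fuel (if valOf regs c ≠ 0 then pc + k else pc + 1) regs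
      | .countdown _ => stepExec prog fuel (pc + 1) regs   -- parsed programs contain no countdown
      | .nop => stepExec prog fuel (pc + 1) regs
    else regs

-- two distinct 3-letter opcodes cannot both prefix the same line
theorem prefix3_unique {l p q : String} (hp : PySem.Str.startswith l p = true)
    (hq : PySem.Str.startswith l q = true) (hlen : p.toList.length = q.toList.length) :
    p = q := by
  rw [PySem.Str.startswith_eq, PySem.Chars.startswith_iff] at hp hq
  have := List.prefix_of_prefix_length_le hp hq (le_of_eq hlen)
  have : p.toList = q.toList := List.IsPrefix.eq_of_length this hlen
  exact String.ext (by simpa [String.ext_iff] using this)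

-- A's inline resolver equals Source B's value()
theorem valOf_eq (regs : PySem.Dict String Int) (tok : String) :
    (if PySem.Dict.contains regs tok then PySem.Dict.getD regs tok 0
     else (PySem.Int.ofStr? tok).getD 0) = valOf regs tok := by
  unfold valOf
  rw [PySem.Dict.contains_eq_isSome_get?]
  cases h : PySem.Dict.get? regs tok with
  | none => simp
  | some x => simp [h, PySem.Dict.getD_eq_get?_getD]

theorem loopA_eq_step (lines : List String)
    (hjnz : ∀ (i : Nat) (hi : i < lines.length), PySem.Str.startswith lines[i] "jnz" = true →
      ∀ c nz v, PySem.Str.split₀ lines[i] = [c, nz, v] →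
        ∃ k, PySem.Int.ofStr? v = some k ∧ 0 ≤ (i : Int) + k) :
    ∀ (fuel : Nat) (n : Int) (regs : PySem.Dict String Int), 0 ≤ n →
      solveLoopA lines fuel n regs = stepExec (lines.map parseInstr) fuel n regs := by
  intro fuel
  induction fuel with
  | zero => intro n regs _; rfl
  | succ fuel ih =>
    intro n regs hn
    by_cases hlt : n < (lines.length : Int)
    · have hnl : n.toNat < lines.length := by omega
      have hget : PySem.List.pyGet? lines n = some lines[n.toNat] :=
        PySem.List.pyGet?_eq_some_getElem lines hn hlt
      have hgetP : PySem.List.pyGet? (lines.map parseInstr) n = some (parseInstr lines[n.toNat]) := by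
        rw [PySem.List.pyGet?_eq_some_getElem (lines.map parseInstr) hn (by simpa using hlt)]
        simp
      set l := lines[n.toNat] with hl
      rw [solveLoopA, stepExec, if_pos hlt,
        if_pos (show 0 ≤ n ∧ n < ((lines.map parseInstr).length : Int) by simpa using ⟨hn, hlt⟩),
        hget, hgetP]
      simp only [Option.getD_some]
      by_cases hcpy : PySem.Str.startswith l "cpy" = true
      · have hincf : PySem.Str.startswith l "inc" = false := by
          cases hb : PySem.Str.startswith l "inc" with
          | false => rfl
          | true => exact absurd (prefix3_unique hb hcpy (by decide)) (by decide)
        have hdecf : PySem.Str.startswith l "dec" = false := by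
          cases hb : PySem.Str.startswith l "dec" with
          | false => rfl
          | true => exact absurd (prefix3_unique hb hcpy (by decide)) (by decide)
        have hjf : PySem.Str.startswith l "jnz" = false := by
          cases hb : PySem.Str.startswith l "jnz" with
          | false => rfl
          | true => exact absurd (prefix3_unique hb hcpy (by decide)) (by decide)
        cases hs : PySem.Str.split₀ l with
        | nil =>
          simp only [parseInstr, hs, hcpy, hincf, hdecf, hjf, Bool.or_self, Bool.false_eq_true, if_true, if_false]
          exact ih (n + 1) regs (by omega)
        | cons t0 rest =>
          match rest with
          | [] =>
            simp only [parseInstr, hs, hcpy, hincf, hdecf, hjf, Bool.or_self, Bool.false_eq_true, if_true, if_false]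
            exact ih (n + 1) regs (by omega)
          | [t1] =>
            simp only [parseInstr, hs, hcpy, hincf, hdecf, hjf, Bool.or_self, Bool.false_eq_true, if_true, if_false]
            exact ih (n + 1) regs (by omega)
          | [t1, t2] =>
            simp only [parseInstr, hs, hcpy, hincf, hdecf, hjf, valOf_eq, Bool.or_self, Bool.false_eq_true, if_true, if_false]
            exact ih (n + 1) _ (by omega)
          | t1 :: t2 :: t3 :: rest' =>
            match rest' with
            | [] =>
              simp only [parseInstr, hs, hcpy, hincf, hdecf, hjf, Bool.or_self, Bool.false_eq_true, if_true, if_false]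
              exact ih (n + 1) _ (by omega)
            | _ :: _ =>
              simp only [parseInstr, hs, hcpy, hincf, hdecf, hjf, Bool.or_self, Bool.false_eq_true, if_true, if_false]
              exact ih (n + 1) regs (by omega)
      · have hcpyf : PySem.Str.startswith l "cpy" = false := by
          cases hb : PySem.Str.startswith l "cpy" with
          | false => rfl
          | true => exact absurd hb hcpy
        by_cases hid : (PySem.Str.startswith l "inc" || PySem.Str.startswith l "dec") = true
        · have hjf : PySem.Str.startswith l "jnz" = false := by
            rcases Bool.or_eq_true _ _ |>.mp hid with h | h <;>
            · cases hb : PySem.Str.startswith l "jnz" with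
              | false => rfl
              | true => exact absurd (prefix3_unique h hb (by decide)) (by decide)
          cases hs : PySem.Str.split₀ l with
          | nil =>
            simp only [parseInstr, hs, hcpyf, hid, hjf, Bool.false_eq_true, if_true, if_false]
            exact ih (n + 1) regs (by omega)
          | cons t0 rest =>
            match rest with
            | [] =>
              simp only [parseInstr, hs, hcpyf, hid, hjf, Bool.false_eq_true, if_true, if_false]
              exact ih (n + 1) regs (by omega)
            | [t1] =>
              simp only [parseInstr, hs, hcpyf, hid, hjf, Bool.false_eq_true, if_true, if_false]
              cases hg : PySem.Dict.get? regs t1 with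
              | none => simp only []; exact ih (n + 1) regs (by omega)
              | some x => simp only []; exact ih (n + 1) _ (by omega)
            | _ :: _ :: _ =>
              simp only [parseInstr, hs, hcpyf, hid, hjf, Bool.false_eq_true, if_true, if_false]
              exact ih (n + 1) regs (by omega)
        · have hidf : (PySem.Str.startswith l "inc" || PySem.Str.startswith l "dec") = false := by
            cases hb : (PySem.Str.startswith l "inc" || PySem.Str.startswith l "dec") with
            | false => rfl
            | true => exact absurd hb hid
          by_cases hj : PySem.Str.startswith l "jnz" = true
          · cases hs : PySem.Str.split₀ l with
            | nil =>
              simp only [parseInstr, hs, hcpyf, hidf, hj, Bool.false_eq_true, if_true, if_false]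
              exact ih (n + 1) regs (by omega)
            | cons t0 rest =>
              match rest with
              | [] =>
                simp only [parseInstr, hs, hcpyf, hidf, hj, Bool.false_eq_true, if_true, if_false]
                exact ih (n + 1) regs (by omega)
              | [t1] =>
                simp only [parseInstr, hs, hcpyf, hidf, hj, Bool.false_eq_true, if_true, if_false]
                exact ih (n + 1) regs (by omega)
              | [t1, t2] =>
                obtain ⟨k, hk, hk1⟩ := hjnz n.toNat hnl (hl ▸ hj) t0 t1 t2 (hl ▸ hs)
                simp only [parseInstr, hs, hcpyf, hidf, hj, valOf_eq, hk, Option.getD_some, Bool.false_eq_true, if_true, if_false]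
                split_ifs with hz <;> exact ih _ regs (by omega)
              | _ :: _ :: _ :: _ =>
                simp only [parseInstr, hs, hcpyf, hidf, hj, Bool.false_eq_true, if_true, if_false]
                exact ih (n + 1) regs (by omega)
          · have hjf : PySem.Str.startswith l "jnz" = false := by
              cases hb : PySem.Str.startswith l "jnz" with
              | false => rfl
              | true => exact absurd hb hj
            simp only [parseInstr, hcpyf, hidf, hjf, Bool.false_eq_true, if_false]
            exact ih (n + 1) regs (by omega)
    · rw [solveLoopA, stepExec, if_neg hlt, if_neg (by simpa using fun _ => hlt)]

theorem compileProg_length (prog : List PInstr) : (compileProg prog).length = prog.length := by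
  simp [compileProg]

theorem compileProg_getElem (prog : List PInstr) (j : Nat) (hj : j < prog.length) :
    (compileProg prog)[j]'(by simpa [compileProg_length] using hj) =
      (match prog[j]? with
       | some (PInstr.jnz r k) =>
           if k = -1 ∧ 1 ≤ j ∧ prog[j - 1]? = some (.add r (-1)) then PInstr.countdown r
           else PInstr.jnz r k
       | some ins => ins
       | none => PInstr.nop : PInstr) := by
  simp only [compileProg, List.getElem_map, List.getElem_range]

-- parseInstr never produces a countdown instruction
theorem parseInstr_ne_countdown (l : String) (r : String) : parseInstr l ≠ .countdown r := by
  unfold parseInstr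
  split_ifs <;> rcases PySem.Str.split₀ l with _ | ⟨a, _ | ⟨b, _ | ⟨c, _ | _⟩⟩⟩ <;> simp

-- a parsed inc/dec line names an initial register (from lineOK)
theorem parse_add_key (keys : List String) (i : Nat) (l : String) (r : String) (d : Int)
    (hok : lineOK keys i l = true) (h : parseInstr l = .add r d) : keys.contains r = true := by
  unfold lineOK at hok
  rw [Bool.and_eq_true, Bool.and_eq_true] at hok
  obtain ⟨⟨-, hok2⟩, -⟩ := hok
  unfold parseInstr at h
  by_cases h1 : PySem.Str.startswith l "cpy" = true
  · rw [if_pos h1] at h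
    rcases hs : PySem.Str.split₀ l with _ | ⟨a, _ | ⟨b, _ | ⟨c, _ | _⟩⟩⟩ <;> rw [hs] at h <;> simp_all
  · rw [if_neg h1] at h
    by_cases h2 : (PySem.Str.startswith l "inc" || PySem.Str.startswith l "dec") = true
    · rw [if_pos h2] at h hok2
      rcases hs : PySem.Str.split₀ l with _ | ⟨a, _ | ⟨b, _ | ⟨c, _ | _⟩⟩⟩ <;> rw [hs] at h hok2 <;>
        simp_all
    · rw [if_neg h2] at h
      split_ifs at h <;>
        rcases hs : PySem.Str.split₀ l with _ | ⟨a, _ | ⟨b, _ | ⟨c, _ | _⟩⟩⟩ <;> rw [hs] at h <;>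
        simp_all

-- one-step unfolding of the small-step interpreter at an in-range pc
theorem stepExec_succ (prog : List PInstr) (f : Nat) (pc : Int) (regs : PySem.Dict String Int)
    (h0 : 0 ≤ pc) (h1 : pc < (prog.length : Int)) :
    stepExec prog (f + 1) pc regs =
      match prog[pc.toNat]'(by omega) with
      | .cpy src dst => stepExec prog f (pc + 1) (PySem.Dict.insert regs dst (valOf regs src))
      | .add r d =>
        (match PySem.Dict.get? regs r with
         | some x => stepExec prog f (pc + 1) (PySem.Dict.insert regs r (x + d))
         | none => stepExec prog f (pc + 1) regs)
      | .jnz c k => stepExec prog f (if valOf regs c ≠ 0 then pc + k else pc + 1) regs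
      | .countdown _ => stepExec prog f (pc + 1) regs
      | .nop => stepExec prog f (pc + 1) regs := by
  rw [stepExec, if_pos ⟨h0, h1⟩, PySem.List.pyGet?_eq_some_getElem prog h0 h1]
  rfl

theorem valOf_of_get? {regs : PySem.Dict String Int} {r : String} {v : Int}
    (h : PySem.Dict.get? regs r = some v) : valOf regs r = v := by
  unfold valOf; rw [h]

-- the countdown loop, characterized on the small-step interpreter
theorem countdown_loop (prog : List PInstr) (j : Nat) (r : String)
    (hj : j < prog.length) (hj1 : 1 ≤ j)
    (hcur : prog[j] = .jnz r (-1)) (hprev : prog[j - 1]'(by omega) = .add r (-1)) :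
    ∀ (f : Nat) (regs : PySem.Dict String Int) (v : Int),
      PySem.Dict.get? regs r = some v → 0 < v →
      stepExec prog f (j : Int) regs =
        if 2 * v ≤ (f : Int) - 1 then
          stepExec prog (f - (2 * v.toNat + 1)) ((j : Int) + 1) (PySem.Dict.insert regs r 0)
        else if f ≤ 1 then regs
        else PySem.Dict.insert regs r (v - min v ((f / 2 : Nat) : Int)) := by
  intro f
  induction f using Nat.strong_induction_on with
  | _ f IH =>
  intro regs v hv hvpos
  have hjlt : (j : Int) < (prog.length : Int) := by exact_mod_cast hj
  match f with
  | 0 =>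
    rw [stepExec, if_neg (by push_cast; omega), if_pos (by norm_num)]
  | 1 =>
    rw [stepExec_succ prog 0 (j : Int) regs (by positivity) hjlt]
    simp only [Int.toNat_natCast, hcur]
    rw [if_pos (by have := valOf_of_get? hv; omega), stepExec,
      if_neg (by push_cast; omega), if_pos (by norm_num)]
  | g + 2 =>
    have hjm : ((j : Int) + -1) = ((j - 1 : Nat) : Int) := by omega
    have hjp : (((j - 1 : Nat) : Int) + 1) = (j : Int) := by omega
    have hstep2 : stepExec prog (g + 2) (j : Int) regs =
        stepExec prog g (j : Int) (PySem.Dict.insert regs r (v + -1)) := by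
      rw [stepExec_succ prog (g + 1) (j : Int) regs (by positivity) hjlt]
      simp only [Int.toNat_natCast, hcur]
      rw [if_pos (by have := valOf_of_get? hv; omega), hjm,
        stepExec_succ prog g ((j - 1 : Nat) : Int) regs (by positivity) (by rw [← hjm]; omega)]
      simp only [Int.toNat_natCast, hprev]
      rw [hv, hjp]
    rw [hstep2]
    have hv' : PySem.Dict.get? (PySem.Dict.insert regs r (v + -1)) r = some (v + -1) :=
      PySem.Dict.get?_insert_self regs r (v + -1)
    by_cases hv1 : v = 1
    · subst hv1
      have hz : (1 : Int) + -1 = 0 := by norm_num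
      rw [hz] at hv' ⊢
      match g with
      | 0 =>
        rw [stepExec]
        split_ifs <;>
          first
            | rfl
            | (exfalso; omega)
      | h + 1 =>
        rw [stepExec_succ prog h (j : Int) _ (by positivity) hjlt]
        simp only [Int.toNat_natCast, hcur]
        rw [if_neg (by have := valOf_of_get? hv'; omega),
          if_pos (by push_cast; omega)]
        congr 1
    · have hv2 : 2 ≤ v := by omega
      have hvm : (0 : Int) < v + -1 := by omega
      rw [IH g (by omega) _ (v + -1) hv' hvm]
      simp only [PySem.Dict.insert_insert_self]
      split_ifs <;>
          first
            | rfl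
            | (exfalso; push_cast at *; omega)
            | (congr 1 <;> first | rfl | omega)

theorem execB_zero (prog : List PInstr) (pc : Int) (regs : PySem.Dict String Int) :
    execB prog 0 pc regs = regs := by
  rw [execB]

-- one-step unfolding of B's loop at an in-range pc
theorem execB_succ (prog : List PInstr) (n : Nat) (pc : Int) (regs : PySem.Dict String Int)
    (h0 : 0 ≤ pc) (h1 : pc < (prog.length : Int)) :
    execB prog (n + 1) pc regs =
      match prog[pc.toNat]'(by omega) with
      | .cpy src dst => execB prog n (pc + 1) (PySem.Dict.insert regs dst (valOf regs src))
      | .add r d =>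
        (match PySem.Dict.get? regs r with
         | some x => execB prog n (pc + 1) (PySem.Dict.insert regs r (x + d))
         | none => execB prog n (pc + 1) regs)
      | .jnz c k => execB prog n (if valOf regs c ≠ 0 then pc + k else pc + 1) regs
      | .countdown r =>
        (if 0 < valOf regs r then
           if 2 * valOf regs r ≤ (n : Int) then
             execB prog (n - 2 * (valOf regs r).toNat) (pc + 1) (PySem.Dict.insert regs r 0)
           else if n = 0 then regs
           else PySem.Dict.insert regs r (valOf regs r - min (valOf regs r) (((n + 1) / 2 : Nat) : Int))
         else execB prog n (pc + (if valOf regs r ≠ 0 then -1 else 1)) regs)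
      | .nop => execB prog n (pc + 1) regs := by
  rw [execB, if_pos ⟨h0, h1⟩, PySem.List.pyGet?_eq_some_getElem prog h0 h1]
  rfl

theorem contains_insert_mono {d : PySem.Dict String Int} {k a : String} {v : Int}
    (h : PySem.Dict.contains d k = true) :
    PySem.Dict.contains (PySem.Dict.insert d a v) k = true := by
  rw [PySem.Dict.contains_insert, h, Bool.or_true]

theorem step_eq_exec (prog : List PInstr) (keys0 : List String)
    (hnc : ∀ (j : Nat) (hj : j < prog.length) (r : String), prog[j] ≠ .countdown r)
    (hadd : ∀ (j : Nat) (hj : j < prog.length) (r : String) (d : Int),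
      prog[j] = .add r d → keys0.contains r = true) :
    ∀ (fuel : Nat) (pc : Int) (regs : PySem.Dict String Int),
      (∀ k, keys0.contains k = true → PySem.Dict.contains regs k = true) →
      stepExec prog fuel pc regs = execB (compileProg prog) fuel pc regs := by
  intro fuel
  induction fuel using Nat.strong_induction_on with
  | _ fuel IH =>
  intro pc regs hinv
  have hlen : ((compileProg prog).length : Int) = (prog.length : Int) := by
    rw [compileProg_length]
  match fuel with
  | 0 => rw [stepExec, execB_zero]
  | n + 1 =>
    by_cases hg : 0 ≤ pc ∧ pc < (prog.length : Int)
    · obtain ⟨h0, h1⟩ := hg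
      have hjN : pc.toNat < prog.length := by omega
      have h1' : pc < ((compileProg prog).length : Int) := by rw [hlen]; exact h1
      have hpc : ((pc.toNat : Nat) : Int) = pc := by omega
      rw [execB_succ (compileProg prog) n pc regs h0 h1']
      have hC := compileProg_getElem prog pc.toNat hjN
      rcases hi : prog[pc.toNat] with ⟨src, dst⟩ | ⟨r, d⟩ | ⟨c, k⟩ | r | _ <;>
        simp only [List.getElem?_eq_getElem hjN, hi] at hC
      · rw [stepExec_succ prog n pc regs h0 h1]
        simp only [hi, hC]
        exact IH n (by omega) _ _ (fun k hk => contains_insert_mono (hinv k hk))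
      · rw [stepExec_succ prog n pc regs h0 h1]
        simp only [hi, hC]
        cases hx : PySem.Dict.get? regs r with
        | some x => exact IH n (by omega) _ _ (fun k hk => contains_insert_mono (hinv k hk))
        | none => exact IH n (by omega) _ _ hinv
      · by_cases hpat : k = -1 ∧ 1 ≤ pc.toNat ∧ prog[pc.toNat - 1]? = some (.add c (-1))
        · obtain ⟨rfl, hge1, hprevopt⟩ := hpat
          rw [if_pos ⟨rfl, hge1, hprevopt⟩] at hC
          simp only [hC]
          have hprev : prog[pc.toNat - 1]'(by omega) = .add c (-1) := by
            have h := List.getElem?_eq_getElem (l := prog) (i := pc.toNat - 1) (Nat.lt_of_le_of_lt (Nat.sub_le _ _) hjN)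
            rw [h] at hprevopt
            exact Option.some.inj hprevopt
          have hkey : keys0.contains c = true := hadd (pc.toNat - 1) (by omega) c (-1) hprev
          have hcont := hinv c hkey
          rw [PySem.Dict.contains_eq_isSome_get?] at hcont
          obtain ⟨v, hv⟩ := Option.isSome_iff_exists.mp hcont
          have hvo : valOf regs c = v := valOf_of_get? hv
          by_cases hpos : 0 < v
          · have hcl := countdown_loop prog pc.toNat c hjN hge1 (by rw [hi]) hprev
              (n + 1) regs v hv hpos
            rw [hpc] at hcl
            rw [hcl, hvo]
            by_cases hcc : 2 * v ≤ (n : Int)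
            · rw [if_pos (by push_cast; omega), if_pos hpos, if_pos hcc]
              have hfe : (n + 1) - (2 * v.toNat + 1) = n - 2 * v.toNat := by omega
              rw [hfe]
              exact IH (n - 2 * v.toNat) (by omega) _ _
                (fun k hk => contains_insert_mono (hinv k hk))
            · rw [if_neg (by push_cast; omega), if_pos hpos, if_neg hcc]
              by_cases hn0 : n = 0
              · subst hn0
                rw [if_pos (by omega), if_pos rfl]
              · rw [if_neg (by omega), if_neg hn0]
          · rw [stepExec_succ prog n pc regs h0 h1]
            simp only [hi, hvo]
            rw [if_neg hpos]
            by_cases hv0 : v = 0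
            · have hvne : ¬ (v ≠ 0) := by omega
              simp only [if_neg hvne]
              exact IH n (by omega) _ _ hinv
            · simp only [if_pos hv0]
              exact IH n (by omega) _ _ hinv
        · rw [if_neg hpat] at hC
          rw [stepExec_succ prog n pc regs h0 h1]
          simp only [hi, hC]
          by_cases hz : valOf regs c ≠ 0
          · simp only [if_pos hz]
            exact IH n (by omega) _ _ hinv
          · simp only [if_neg hz]
            exact IH n (by omega) _ _ hinv
      · exact absurd hi (hnc pc.toNat hjN r)
      · rw [stepExec_succ prog n pc regs h0 h1]
        simp only [hi, hC]
        exact IH n (by omega) _ _ hinv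
    · rw [stepExec, execB, if_neg hg, if_neg (by rw [hlen]; exact hg)]

theorem contains_mk_of_fst (l : List (String × Int)) (k : String)
    (h : (l.map Prod.fst).contains k = true) :
    PySem.Dict.contains (PySem.Dict.mk l) k = true := by
  simp [PySem.Dict.contains_mk] at *
  exact Exists.imp (fun a a_1 => a_1) h

-- ===== VERDICT (by name: the statement is the Claim_ definition above) =====
theorem solve_spec : Claim_equal_solve := by
  intro pinput registers _hdom hpre
  unfold Spec_solve solve solve_alt
  have hjnz : ∀ (i : Nat) (hi : i < (PySem.Str.splitlines pinput).length),
      PySem.Str.startswith (PySem.Str.splitlines pinput)[i] "jnz" = true →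
      ∀ c nz v, PySem.Str.split₀ (PySem.Str.splitlines pinput)[i] = [c, nz, v] →
        ∃ k, PySem.Int.ofStr? v = some k ∧ 0 ≤ (i : Int) + k := by
    intro i hi hjz c nz v hs
    have h := hpre i hi
    unfold lineOK at h
    rw [Bool.and_eq_true, Bool.and_eq_true] at h
    have h3 := h.2
    rw [if_pos hjz, hs] at h3
    rw [Bool.and_eq_true] at h3
    cases hv : PySem.Int.ofStr? v with
    | none => rw [hv] at h3; exact absurd h3.2 (by simp)
    | some k => rw [hv] at h3; exact ⟨k, rfl, by simpa using h3.2⟩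
  have hnc : ∀ (j : Nat) (hj : j < ((PySem.Str.splitlines pinput).map parseInstr).length)
      (r : String), ((PySem.Str.splitlines pinput).map parseInstr)[j] ≠ .countdown r := by
    intro j hj r
    rw [List.getElem_map]
    exact parseInstr_ne_countdown _ r
  have hadd : ∀ (j : Nat) (hj : j < ((PySem.Str.splitlines pinput).map parseInstr).length)
      (r : String) (d : Int), ((PySem.Str.splitlines pinput).map parseInstr)[j] = .add r d →
      (registers.map Prod.fst).contains r = true := by
    intro j hj r d h
    rw [List.getElem_map] at h
    exact parse_add_key (registers.map Prod.fst) j _ r d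
      (hpre j (by simpa using hj)) h
  have hinv : ∀ k, (registers.map Prod.fst).contains k = true →
      PySem.Dict.contains (PySem.Dict.mk registers) k = true :=
    fun k hk => contains_mk_of_fst registers k hk
  show (solveLoopA (PySem.Str.splitlines pinput) (2 ^ 63) 0 (PySem.Dict.mk registers)).items =
    (execB (compileProg ((PySem.Str.splitlines pinput).map parseInstr)) (2 ^ 63) 0
      (PySem.Dict.mk registers)).items
  rw [loopA_eq_step (PySem.Str.splitlines pinput) hjnz (2 ^ 63) 0 (PySem.Dict.mk registers) le_rfl,
    step_eq_exec ((PySem.Str.splitlines pinput).map parseInstr) (registers.map Prod.fst)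
      hnc hadd (2 ^ 63) 0 (PySem.Dict.mk registers) hinv]
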